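-- pv_equiv track=rewrite | github.com/blackfisch/adventofcode-2021 | Day3/part1.py | get_common_bits
-- ===== SOURCE A (Python) =====
-- def get_common_bits(input: list) -> dict:
--     '''
--         this solution is hacky again.
--         the key of amounts dict is actually the index of the bit in the binary number
--         the value is another dict, containing keys '1' and '0' (binary value) with the
--         number of times it appears in the index of the bit
--     '''
--     amounts = {}
--     for line in input:
--         digits = list(line)  # split strings into single (binary) digits
--
--         for i, d in enumerate(digits):
--             place = amounts.get(i, {})
--             amount = place.get(d, 0)
--
--             place[d] = amount + 1
--             amounts[i] = place
--     return amounts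
-- ===== SOURCE B (Python) =====
-- def get_common_bits(input: list) -> dict:
--     maxlen = max(map(len, input), default=0)
--     result = {}
--     for i in range(maxlen):
--         col = {}
--         for line in input:
--             if i < len(line):
--                 ch = line[i]
--                 col[ch] = col.get(ch, 0) + 1
--         result[i] = col
--     return result
-- ===== Notes on version B (the rewrite author's own statement) =====
-- stated objective: alternative
-- what changed: B transposes the traversal: it computes the maximum line length once, then loops over bit positions and rescans all lines per position to build each column's counter dict, instead of A's single pass over lines that incrementally updates a nested dict of dicts.
import Mathlib
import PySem

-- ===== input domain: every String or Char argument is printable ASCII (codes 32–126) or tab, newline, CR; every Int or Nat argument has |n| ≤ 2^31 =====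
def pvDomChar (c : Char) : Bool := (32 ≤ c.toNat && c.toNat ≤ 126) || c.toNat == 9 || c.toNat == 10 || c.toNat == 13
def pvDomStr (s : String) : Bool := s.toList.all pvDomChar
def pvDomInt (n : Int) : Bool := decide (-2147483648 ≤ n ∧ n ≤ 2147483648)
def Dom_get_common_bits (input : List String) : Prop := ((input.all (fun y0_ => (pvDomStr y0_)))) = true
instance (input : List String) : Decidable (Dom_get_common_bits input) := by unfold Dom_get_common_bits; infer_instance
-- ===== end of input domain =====

-- B transposes the traversal (outer loop over bit positions, inner rescan of the lines) instead of
-- A's line-by-line nested-dict updates; objective: alternative decomposition, same cost.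

-- ===== PORT A =====
-- per-(index, digit) update of the amounts dict (body of A's inner loop)
def gcbStepFn (amounts : PySem.Dict Int (PySem.Dict String Int)) (p : Int × String) :
    PySem.Dict Int (PySem.Dict String Int) :=
  let place := amounts.getD p.1 PySem.Dict.empty
  let amount := place.getD p.2 0
  amounts.insert p.1 (place.insert p.2 (amount + 1))

-- one line of A's outer loop: 'digits = list(line); for i, d in enumerate(digits): …'
def gcbStep (amounts : PySem.Dict Int (PySem.Dict String Int)) (line : String) :
    PySem.Dict Int (PySem.Dict String Int) :=
  (PySem.List.enumerate (line.toList.map (fun c => String.ofList [c]))).foldl gcbStepFn amounts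

def get_common_bits (input : List String) : List (Int × List (String × Int)) :=
  ((input.foldl gcbStep PySem.Dict.empty).items).map (fun p => (p.1, p.2.items))

-- ===== PORT B =====
-- count of the characters appearing at position i, scanning all lines (B's inner loop)
def gcbCol (input : List String) (i : Int) : PySem.Dict String Int :=
  input.foldl
    (fun col line =>
      if i < PySem.Str.len line then
        match PySem.Str.pyGet? line i with
        | some c =>
          let ch := String.ofList [c]
          col.insert ch (col.getD ch 0 + 1)
        | none => col   -- unreachable: i < len(line) guarantees line[i] exists
      else col)
    PySem.Dict.empty

def get_common_bits_alt (input : List String) : List (Int × List (String × Int)) :=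
  let maxlen := PySem.List.maxD (input.map PySem.Str.len) (fun x => x) 0
  (((PySem.List.pyRange 0 maxlen 1).foldl
      (fun res i => res.insert i (gcbCol input i)) PySem.Dict.empty).items).map
    (fun p => (p.1, p.2.items))

-- ===== PRECONDITION & SPEC =====
def Spec_get_common_bits (input : List String) (out : List (Int × List (String × Int))) : Prop := out = get_common_bits_alt input
instance (input : List String) (out : List (Int × List (String × Int))) : Decidable (Spec_get_common_bits input out) := by unfold Spec_get_common_bits; infer_instance

-- ===== CLAIM (what is proved, stated in full; the proofs are below) =====
def Claim_equal_get_common_bits : Prop := ∀ (input : List String), Dom_get_common_bits input → Spec_get_common_bits input (get_common_bits input)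

-- ===== LEMMAS AND PROOFS =====

-- d[ch] = d.get(ch, 0) + 1 for a single character
def pvUpd (col : PySem.Dict String Int) (c : Char) : PySem.Dict String Int :=
  col.insert (String.ofList [c]) (col.getD (String.ofList [c]) 0 + 1)

-- one line's contribution to the count at column k
def pvColStep (k : Nat) (col : PySem.Dict String Int) (line : String) : PySem.Dict String Int :=
  match line.toList[k]? with
  | some c => pvUpd col c
  | none => col

def pvColN (input : List String) (k : Nat) : PySem.Dict String Int :=
  input.foldl (pvColStep k) PySem.Dict.empty

def pvMaxLen (input : List String) : Nat :=
  input.foldl (fun m l => Nat.max m l.toList.length) 0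

-- the canonical item list: keys 0,…,n-1 in order, value g k at key k
def pvCanon (g : Nat → PySem.Dict String Int) : Nat → List (Int × PySem.Dict String Int)
  | 0 => []
  | n+1 => pvCanon g n ++ [((n : Int), g n)]

lemma pv_congr (g g' : Nat → PySem.Dict String Int) (n : Nat) (h : ∀ k < n, g k = g' k) :
    pvCanon g n = pvCanon g' n := by
  induction n with
  | zero => rfl
  | succ n ih =>
    simp only [pvCanon]
    rw [ih (fun k hk => h k (by omega)), h n (by omega)]

lemma pv_find (g : Nat → PySem.Dict String Int) (n j : Nat) :
    List.find? (fun p => p.1 == ((j : Nat) : Int)) (pvCanon g n)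
      = if j < n then some (((j : Nat) : Int), g j) else none := by
  induction n with
  | zero => simp [pvCanon]
  | succ n ih =>
    simp only [pvCanon, List.find?_append, ih]
    by_cases hj : j < n
    · have h1 : j < n + 1 := by omega
      simp [hj, h1]
    · by_cases hjn : j = n
      · subst hjn
        have h1 : ¬ j < j := by omega
        have h2 : j < j + 1 := by omega
        simp [h2]
      · have h1 : ¬ j < n + 1 := by omega
        have h2 : ((n : Int) == (j : Int)) = false := by
          simp only [beq_eq_false_iff_ne, ne_eq, Int.natCast_inj]
          omega
        simp [hj, h1, h2]

lemma pv_contains (g : Nat → PySem.Dict String Int) (n j : Nat) :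
    (PySem.Dict.mk (pvCanon g n)).contains ((j : Nat) : Int) = decide (j < n) := by
  by_cases hj : j < n
  · have h1 : (List.find? (fun p => p.1 == ((j : Nat) : Int)) (pvCanon g n)).isSome = true := by
      rw [pv_find]; simp [hj]
    have h2 := List.find?_isSome.mp h1
    have h3 : (pvCanon g n).any (fun p => p.1 == ((j : Nat) : Int)) = true :=
      List.any_eq_true.mpr h2
    simp [PySem.Dict.contains, h3, hj]
  · have h1 : List.find? (fun p => p.1 == ((j : Nat) : Int)) (pvCanon g n) = none := by
      rw [pv_find]; simp [hj]
    have h2 := List.find?_eq_none.mp h1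
    have h3 : (pvCanon g n).any (fun p => p.1 == ((j : Nat) : Int)) = false := by
      rw [List.any_eq_false]
      intro p hp
      simp [h2 p hp]
    simp [PySem.Dict.contains, h3, hj]

lemma pv_getD (g : Nat → PySem.Dict String Int) (n j : Nat) (d : PySem.Dict String Int) :
    (PySem.Dict.mk (pvCanon g n)).getD ((j : Nat) : Int) d = if j < n then g j else d := by
  simp only [PySem.Dict.getD, PySem.Dict.get?, pv_find]
  by_cases hj : j < n <;> simp [hj]

lemma pv_map (g : Nat → PySem.Dict String Int) (n j : Nat) (v : PySem.Dict String Int) :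
    (pvCanon g n).map (fun p => if p.1 == ((j : Nat) : Int) then (((j : Nat) : Int), v) else p)
      = pvCanon (fun k => if k = j then v else g k) n := by
  induction n with
  | zero => rfl
  | succ n ih =>
    simp only [pvCanon, List.map_append, ih, List.map_cons, List.map_nil]
    by_cases hjn : n = j
    · subst hjn; simp
    · have h2 : ((n : Int) == (j : Int)) = false := by
        simp only [beq_eq_false_iff_ne, ne_eq, Int.natCast_inj]
        omega
      simp [h2, hjn]

lemma pv_insert_lt (g : Nat → PySem.Dict String Int) (n j : Nat) (v : PySem.Dict String Int)
    (h : j < n) :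
    (PySem.Dict.mk (pvCanon g n)).insert ((j : Nat) : Int) v
      = PySem.Dict.mk (pvCanon (fun k => if k = j then v else g k) n) := by
  have hc : (PySem.Dict.mk (pvCanon g n)).contains ((j : Nat) : Int) = true := by
    rw [pv_contains]; simp [h]
  simp only [PySem.Dict.insert, hc, if_pos, pv_map]

lemma pv_insert_self (g : Nat → PySem.Dict String Int) (n : Nat) (v : PySem.Dict String Int) :
    (PySem.Dict.mk (pvCanon g n)).insert ((n : Nat) : Int) v
      = PySem.Dict.mk (pvCanon (fun k => if k = n then v else g k) (n + 1)) := by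
  have hc : (PySem.Dict.mk (pvCanon g n)).contains ((n : Nat) : Int) = false := by
    rw [pv_contains]; simp
  have hr : pvCanon (fun k => if k = n then v else g k) (n + 1)
      = pvCanon g n ++ [((n : Int), v)] := by
    simp only [pvCanon]
    rw [pv_congr (fun k => if k = n then v else g k) g n
      (fun k hk => if_neg (Nat.ne_of_lt hk))]
    simp
  simp only [PySem.Dict.insert, hc, Bool.false_eq_true, if_false, hr]

-- effect of the tail of A's inner loop starting at index s on a canonical state
def pvApply (g : Nat → PySem.Dict String Int) (s : Nat) (cs : List Char) (k : Nat) :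
    PySem.Dict String Int :=
  if s ≤ k then
    match cs[k - s]? with
    | some c => pvUpd (g k) c
    | none => g k
  else g k

lemma pv_inner (cs : List Char) : ∀ (s m : Nat) (g : Nat → PySem.Dict String Int),
    s ≤ m → (∀ k, m ≤ k → g k = PySem.Dict.empty) →
    (PySem.List.enumerate (cs.map (fun c => String.ofList [c])) ((s : Nat) : Int)).foldl
        gcbStepFn (PySem.Dict.mk (pvCanon g m))
      = PySem.Dict.mk (pvCanon (pvApply g s cs) (Nat.max m (s + cs.length))) := by
  induction cs with
  | nil =>
    intro s m g hsm hg
    have hfun : pvApply g s [] = g := by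
      funext k; simp [pvApply]
    rw [List.map_nil, PySem.List.enumerate_nil, List.foldl_nil, hfun]
    have hmx : Nat.max m (s + ([] : List Char).length) = m := by
      simp only [List.length_nil, Nat.add_zero]
      exact Nat.max_eq_left hsm
    rw [hmx]
  | cons c cs ih =>
    intro s m g hsm hg
    have hplace : (PySem.Dict.mk (pvCanon g m)).getD ((s : Nat) : Int) PySem.Dict.empty = g s := by
      rw [pv_getD]
      by_cases h : s < m
      · simp [h]
      · have hsm' : s = m := by omega
        simp [h, hg s (by omega)]
    have hstep :
        gcbStepFn (PySem.Dict.mk (pvCanon g m)) (((s : Nat) : Int), String.ofList [c])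
          = PySem.Dict.mk (pvCanon (fun k => if k = s then pvUpd (g s) c else g k)
              (Nat.max m (s + 1))) := by
      simp only [gcbStepFn, hplace]
      by_cases h : s < m
      · rw [pv_insert_lt g m s _ h]
        have hmx : Nat.max m (s + 1) = m := Nat.max_eq_left (by omega)
        rw [hmx]
        rfl
      · have hsm' : s = m := by omega
        subst hsm'
        rw [pv_insert_self]
        have hmx : Nat.max s (s + 1) = s + 1 := Nat.max_eq_right (by omega)
        rw [hmx]
        rfl
    have hcast : ((s : Nat) : Int) + 1 = (((s + 1 : Nat)) : Int) := by push_cast; ring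
    rw [List.map_cons, PySem.List.enumerate_cons, List.foldl_cons, hcast, hstep,
      ih (s + 1) (Nat.max m (s + 1)) _
        (Nat.le_max_right m (s + 1))
        (fun k hk => by
          have hks : ¬ k = s := by
            have h1 := Nat.le_max_right m (s + 1)
            have : s + 1 ≤ k := le_trans h1 hk
            omega
          have hkm : m ≤ k := le_trans (Nat.le_max_left m (s + 1)) hk
          simp only [hks, if_false]
          exact hg k hkm)]
    have hb : Nat.max (Nat.max m (s + 1)) (s + 1 + cs.length)
        = Nat.max m (s + (c :: cs).length) := by
      simp only [List.length_cons, Nat.max_def]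
      split_ifs <;> omega
    have hf : pvApply (fun k => if k = s then pvUpd (g s) c else g k) (s + 1) cs
        = pvApply g s (c :: cs) := by
      funext k
      rcases lt_trichotomy k s with hk | hk | hk
      · have h1 : ¬ s + 1 ≤ k := by omega
        have h1' : ¬ s < k := by omega
        have h2 : ¬ s ≤ k := by omega
        have h3 : ¬ k = s := by omega
        simp [pvApply, h1, h2, h3]
      · subst hk
        have h1 : ¬ k + 1 ≤ k := by omega
        have h1' : ¬ k < k := by omega
        simp [pvApply, h1]
      · have h1 : s + 1 ≤ k := by omega
        have h1' : s < k := by omega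
        have h2 : s ≤ k := by omega
        have h3 : ¬ k = s := by omega
        have hsub : k - s = (k - (s + 1)) + 1 := by omega
        simp [pvApply, h1, h2, h3, hsub]
    rw [hb, hf]

lemma pv_maxlen_le (input : List String) : ∀ l ∈ input, l.toList.length ≤ pvMaxLen input := by
  suffices h : ∀ (ls : List String) (a : Nat),
      (a ≤ ls.foldl (fun m l => Nat.max m l.toList.length) a) ∧
      (∀ l ∈ ls, l.toList.length ≤ ls.foldl (fun m l => Nat.max m l.toList.length) a) by
    exact (h input 0).2
  intro ls
  induction ls with
  | nil => simp
  | cons x xs ih =>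
    intro a
    refine ⟨le_trans (Nat.le_max_left a x.toList.length) (ih _).1, ?_⟩
    intro l hl
    rcases List.mem_cons.mp hl with rfl | hl'
    · exact le_trans (Nat.le_max_right a l.toList.length) (ih _).1
    · exact (ih (Nat.max a x.toList.length)).2 l hl'

lemma pv_colN_empty (input : List String) (k : Nat) (h : pvMaxLen input ≤ k) :
    pvColN input k = PySem.Dict.empty := by
  have hall : ∀ l ∈ input, l.toList.length ≤ k :=
    fun l hl => le_trans (pv_maxlen_le input l hl) h
  suffices hgen : ∀ (ls : List String) (col : PySem.Dict String Int),
      (∀ l ∈ ls, l.toList.length ≤ k) → ls.foldl (pvColStep k) col = col by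
    exact hgen input PySem.Dict.empty hall
  intro ls
  induction ls with
  | nil => intro col _; rfl
  | cons x xs ih =>
    intro col hls
    have hx : x.toList[k]? = none := by
      simp only [List.getElem?_eq_none_iff]
      exact hls x (by simp)
    simp only [List.foldl_cons, pvColStep, hx]
    exact ih col (fun l hl => hls l (by simp [hl]))

lemma pv_A (input : List String) :
    input.foldl gcbStep PySem.Dict.empty
      = PySem.Dict.mk (pvCanon (pvColN input) (pvMaxLen input)) := by
  induction input using List.reverseRecOn with
  | nil => rfl
  | append_singleton pre l ih =>
    rw [List.foldl_append, ih]
    have h0 : (0 : Int) = ((0 : Nat) : Int) := by norm_num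
    have hinner := pv_inner l.toList 0 (pvMaxLen pre) (pvColN pre) (by omega)
      (fun k hk => pv_colN_empty pre k hk)
    simp only [List.foldl_cons, List.foldl_nil, gcbStep]
    rw [h0, hinner]
    have hm : Nat.max (pvMaxLen pre) (0 + l.toList.length) = pvMaxLen (pre ++ [l]) := by
      simp only [pvMaxLen, List.foldl_append, List.foldl_cons, List.foldl_nil, Nat.zero_add]
    have hf : pvApply (pvColN pre) 0 l.toList = pvColN (pre ++ [l]) := by
      funext k
      simp only [pvApply, pvColN, List.foldl_append, List.foldl_cons, List.foldl_nil,
        Nat.zero_le, if_pos, Nat.sub_zero]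
      rfl
    rw [hm, hf]

lemma pv_col_eq (input : List String) (k : Nat) : gcbCol input ((k : Nat) : Int) = pvColN input k := by
  have hstep : (fun (col : PySem.Dict String Int) (line : String) =>
      if ((k : Nat) : Int) < PySem.Str.len line then
        match PySem.Str.pyGet? line ((k : Nat) : Int) with
        | some c =>
          let ch := String.ofList [c]
          col.insert ch (col.getD ch 0 + 1)
        | none => col
      else col) = pvColStep k := by
    funext col line
    by_cases h : k < line.toList.length
    · have hlt : ((k : Nat) : Int) < PySem.Str.len line := by
        rw [PySem.Str.len_eq]; exact_mod_cast h
      have hget : PySem.Str.pyGet? line ((k : Nat) : Int) = some line.toList[k] := by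
        simp [PySem.Str.pyGet?, PySem.Chars.pyGet?, PySem.List.pyGet?_natCast,
          List.getElem?_eq_getElem h]
      have hget' : line.toList[k]? = some line.toList[k] := List.getElem?_eq_getElem h
      simp only [hlt, if_pos, hget, pvColStep, hget']
      rfl
    · have hge : ¬ ((k : Nat) : Int) < PySem.Str.len line := by
        rw [PySem.Str.len_eq]; exact_mod_cast h
      have hget' : line.toList[k]? = none := by
        simp only [List.getElem?_eq_none_iff]; omega
      simp [pvColStep, hget']
  simp only [gcbCol, pvColN, hstep]

lemma pv_maxD (input : List String) :
    PySem.List.maxD (input.map PySem.Str.len) (fun x => x) 0 = ((pvMaxLen input : Nat) : Int) := by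
  have hmaxcons : ∀ (b : Int) (l : List Int) (a' : Int),
      PySem.List.max? (a' :: b :: l) (fun x => x)
        = PySem.List.max? ((if a' < b then b else a') :: l) (fun x => x) := by
    intro b l a'
    by_cases hc : a' < b
    · simp [PySem.List.max?, hc]
    · simp [PySem.List.max?, hc]
  have haux : ∀ (ls : List String) (a : Nat),
      PySem.List.max? (((a : Nat) : Int) :: ls.map PySem.Str.len) (fun x => x)
      = some (((ls.foldl (fun m l => Nat.max m l.toList.length) a : Nat)) : Int) := by
    intro ls
    induction ls with
    | nil => intro a; rfl
    | cons x xs ih =>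
      intro a
      have hx : PySem.Str.len x = ((x.toList.length : Nat) : Int) := PySem.Str.len_eq x
      rw [List.map_cons, hmaxcons (PySem.Str.len x) (xs.map PySem.Str.len) ((a : Nat) : Int)]
      by_cases h : a < x.toList.length
      · have h1 : ((a : Nat) : Int) < PySem.Str.len x := by rw [hx]; exact_mod_cast h
        have h2 : Nat.max a x.toList.length = x.toList.length := Nat.max_eq_right (le_of_lt h)
        rw [if_pos h1, hx, ih]
        simp only [List.foldl_cons]
        rw [h2]
      · have h1 : ¬ ((a : Nat) : Int) < PySem.Str.len x := by rw [hx]; exact_mod_cast h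
        have h2 : Nat.max a x.toList.length = a := Nat.max_eq_left (by omega)
        rw [if_neg h1, ih]
        simp only [List.foldl_cons]
        rw [h2]
  cases input with
  | nil => rfl
  | cons x xs =>
    have hx : PySem.Str.len x = ((x.toList.length : Nat) : Int) := PySem.Str.len_eq x
    show (PySem.List.max? ((x :: xs).map PySem.Str.len) (fun x => x)).getD 0 = _
    have hcons : (x :: xs).map PySem.Str.len
        = ((x.toList.length : Nat) : Int) :: xs.map PySem.Str.len := by
      rw [List.map_cons, hx]
    have hm : PySem.List.max? (((x.toList.length : Nat) : Int) :: xs.map PySem.Str.len)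
          (fun x => x)
        = PySem.List.max? ((x :: xs).map PySem.Str.len) (fun x => x) := by rw [hcons]
    rw [← hm, haux]
    simp only [Option.getD_some, pvMaxLen, List.foldl_cons, Nat.zero_max]

lemma pv_B (input : List String) :
    get_common_bits_alt input
      = (pvCanon (pvColN input) (pvMaxLen input)).map (fun p => (p.1, p.2.items)) := by
  have hfold : ∀ (n : Nat),
      (List.range n).foldl
          (fun (res : PySem.Dict Int (PySem.Dict String Int)) (k : Nat) =>
            res.insert ((k : Nat) : Int) (gcbCol input ((k : Nat) : Int))) PySem.Dict.empty
        = PySem.Dict.mk (pvCanon (pvColN input) n) := by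
    intro n
    induction n with
    | zero => rfl
    | succ n ih =>
      rw [List.range_succ, List.foldl_append, ih]
      simp only [List.foldl_cons, List.foldl_nil]
      rw [pv_col_eq, pv_insert_self]
      congr 1
      simp only [pvCanon]
      rw [pv_congr (fun k => if k = n then pvColN input n else pvColN input k) (pvColN input) n
        (fun k hk => if_neg (Nat.ne_of_lt hk))]
      simp
  have hrange : PySem.List.pyRange 0 ((pvMaxLen input : Nat) : Int) 1
      = (List.range (pvMaxLen input)).map (fun k => ((k : Nat) : Int)) := by
    rw [PySem.List.pyRange_one]
    simp
  simp only [get_common_bits_alt, pv_maxD, hrange, List.foldl_map]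
  rw [hfold]

-- ===== VERDICT (by name: the statement is the Claim_ definition above) =====
theorem get_common_bits_spec : Claim_equal_get_common_bits := by
  intro input _
  show get_common_bits input = get_common_bits_alt input
  rw [pv_B]
  simp only [get_common_bits, pv_A]
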